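-- pv_equiv track=rewrite | github.com/clocksmith/fawn | bench/dawn_benchmark_adapter.py | parse_adapter_requirements
-- ===== SOURCE A (Python) =====
-- def parse_adapter_requirements(extra_args: list[str]) -> tuple[str | None, str | None]:
--     backend = None
--     vendor_id = None
--     index = 0
--     while index < len(extra_args):
--         arg = extra_args[index]
--         if arg == "--backend" and index + 1 < len(extra_args):
--             backend = extra_args[index + 1].strip().lower()
--             index += 1
--         elif arg.startswith("--backend="):
--             backend = arg.split("=", 1)[1].strip().lower()
--         elif arg == "--adapter-vendor-id" and index + 1 < len(extra_args):
--             vendor_id = extra_args[index + 1].strip().lower()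
--             index += 1
--         elif arg.startswith("--adapter-vendor-id="):
--             vendor_id = arg.split("=", 1)[1].strip().lower()
--         index += 1
--     return backend, vendor_id
-- ===== SOURCE B (Python) =====
-- def parse_adapter_requirements(extra_args):
--     backend = None
--     vendor_id = None
--     pending = None  # key currently awaiting its value, or None
--     for arg in extra_args:
--         if pending == "backend":
--             backend = arg.strip().lower()
--             pending = None
--         elif pending == "vendor":
--             vendor_id = arg.strip().lower()
--             pending = None
--         elif arg == "--backend":
--             pending = "backend"
--         elif arg == "--adapter-vendor-id":
--             pending = "vendor"
--         elif arg.startswith("--backend="):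
--             backend = arg.split("=", 1)[1].strip().lower()
--         elif arg.startswith("--adapter-vendor-id="):
--             vendor_id = arg.split("=", 1)[1].strip().lower()
--     return backend, vendor_id
-- ===== Notes on version B (the rewrite author's own statement) =====
-- stated objective: simpler
-- what changed: Replaced A's index-based while loop with look-ahead (extra_args[index+1] and manual index skipping) by a single for-loop state machine carrying a 'pending' key that consumes the next argument as its value.
import Mathlib
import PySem

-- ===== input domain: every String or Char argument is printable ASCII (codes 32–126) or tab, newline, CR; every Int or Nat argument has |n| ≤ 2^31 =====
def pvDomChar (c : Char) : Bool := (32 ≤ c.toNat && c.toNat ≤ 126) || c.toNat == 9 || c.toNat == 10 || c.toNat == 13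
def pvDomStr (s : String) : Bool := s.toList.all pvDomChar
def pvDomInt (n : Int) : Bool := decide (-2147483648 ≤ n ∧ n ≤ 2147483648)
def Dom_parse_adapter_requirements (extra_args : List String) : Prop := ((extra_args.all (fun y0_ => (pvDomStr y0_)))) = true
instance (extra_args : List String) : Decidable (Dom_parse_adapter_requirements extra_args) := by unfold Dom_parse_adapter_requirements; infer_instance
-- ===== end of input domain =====

-- B replaces A's index-based while loop with look-ahead by a single for-loop state machine
-- carrying a 'pending' key awaiting its value (objective: simpler, same cost).

-- arg.strip().lower()
def pvNorm (s : String) : String := PySem.Str.lower (PySem.Str.strip s)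

-- arg.split("=", 1)[1] — in both programs only reached when '=' occurs in arg (startswith guard),
-- so the defaults never fire; exact there.
def pvAfterEq (s : String) : String :=
  match PySem.Str.splitMax? s "=" 1 with
  | some (_ :: tail :: _) => tail
  | _ => ""

-- ===== PORT A =====
-- A's while loop over an index, consuming the next element on a bare flag, becomes the
-- obvious structural recursion over the remaining suffix (rest ≠ [] ↔ index+1 < len).
def pvALoop (l : List String) (backend vendor_id : Option String) : Option String × Option String :=
  match l with
  | [] => (backend, vendor_id)
  | arg :: rest =>
    if arg = "--backend" ∧ rest ≠ [] then
      pvALoop rest.tail (some (pvNorm (rest.headD ""))) vendor_id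
    else if PySem.Str.startswith arg "--backend=" then
      pvALoop rest (some (pvNorm (pvAfterEq arg))) vendor_id
    else if arg = "--adapter-vendor-id" ∧ rest ≠ [] then
      pvALoop rest.tail backend (some (pvNorm (rest.headD "")))
    else if PySem.Str.startswith arg "--adapter-vendor-id=" then
      pvALoop rest backend (some (pvNorm (pvAfterEq arg)))
    else
      pvALoop rest backend vendor_id
  termination_by l.length
  decreasing_by all_goals cases rest <;> simp_all

def parse_adapter_requirements (extra_args : List String) : Option String × Option String :=
  pvALoop extra_args none none

-- ===== PORT B =====
-- state: (backend, vendor_id, pending)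
def pvBStep (st : Option String × Option String × Option String) (arg : String) :
    Option String × Option String × Option String :=
  match st with
  | (backend, vendor_id, pending) =>
    if pending = some "backend" then (some (pvNorm arg), vendor_id, none)
    else if pending = some "vendor" then (backend, some (pvNorm arg), none)
    else if arg = "--backend" then (backend, vendor_id, some "backend")
    else if arg = "--adapter-vendor-id" then (backend, vendor_id, some "vendor")
    else if PySem.Str.startswith arg "--backend=" then (some (pvNorm (pvAfterEq arg)), vendor_id, pending)
    else if PySem.Str.startswith arg "--adapter-vendor-id=" then (backend, some (pvNorm (pvAfterEq arg)), pending)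
    else (backend, vendor_id, pending)

def parse_adapter_requirements_alt (extra_args : List String) : Option String × Option String :=
  match extra_args.foldl pvBStep (none, none, none) with
  | (backend, vendor_id, _) => (backend, vendor_id)

-- ===== PRECONDITION & SPEC =====
def Spec_parse_adapter_requirements (extra_args : List String) (out : Option String × Option String) : Prop := out = parse_adapter_requirements_alt extra_args
instance (extra_args : List String) (out : Option String × Option String) : Decidable (Spec_parse_adapter_requirements extra_args out) := by unfold Spec_parse_adapter_requirements; infer_instance

-- ===== CLAIM (what is proved, stated in full; the proofs are below) =====
def Claim_equal_parse_adapter_requirements : Prop := ∀ (extra_args : List String), Dom_parse_adapter_requirements extra_args → Spec_parse_adapter_requirements extra_args (parse_adapter_requirements extra_args)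

-- ===== LEMMAS AND PROOFS =====

-- A bare flag as last element: A's look-ahead fails and nothing happens; B leaves pending set
-- and the fold ends.  Both fall out of the invariant below (pending none ↔ same suffix state).
theorem pvLoop_agree_aux (n : Nat) : ∀ (l : List String), l.length ≤ n → ∀ (b v : Option String),
    (match l.foldl pvBStep (b, v, none) with | (x, y, _) => (x, y)) = pvALoop l b v := by
  induction n with
  | zero =>
    intro l h b v
    cases l with
    | nil => simp [pvALoop]
    | cons a r => simp at h
  | succ n ih =>
    intro l hlen b v
    cases l with
    | nil => simp [pvALoop]
    | cons arg rest =>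
      rw [pvALoop]
      by_cases hb : arg = "--backend"
      · cases rest with
        | nil =>
          simp [pvBStep, hb, List.foldl]
          rw [if_neg (by decide), if_neg (by decide)]
          simp [pvALoop]
        | cons nxt rest' =>
          have h1 : (arg :: nxt :: rest').foldl pvBStep (b, v, none)
              = rest'.foldl pvBStep (some (pvNorm nxt), v, none) := by
            simp [List.foldl, pvBStep, hb]
          rw [h1]
          simp only [hb]
          simp only [List.tail, List.headD, ne_eq, reduceCtorEq, not_false_eq_true, and_true,
            ite_true]
          exact ih rest' (by simp at hlen; omega) _ _
      · by_cases hv : arg = "--adapter-vendor-id"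
        · cases rest with
          | nil =>
            simp [pvBStep, hv, List.foldl]
            rw [if_neg (by decide), if_neg (by decide)]
            simp [pvALoop]
          | cons nxt rest' =>
            have h1 : (arg :: nxt :: rest').foldl pvBStep (b, v, none)
                = rest'.foldl pvBStep (b, some (pvNorm nxt), none) := by
              simp [List.foldl, pvBStep, hv]
            rw [h1]
            simp only [hv]
            rw [if_neg (by simp), if_neg (by decide), if_pos (by simp)]
            simp only [List.tail_cons, List.headD_cons]
            exact ih rest' (by simp at hlen; omega) _ _
        · -- arg is not a bare flag: both sides treat arg alone and recurse on rest
          have h1 : (arg :: rest).foldl pvBStep (b, v, none)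
              = rest.foldl pvBStep (pvBStep (b, v, none) arg) := by simp [List.foldl]
          rw [h1]
          simp only [pvBStep, reduceCtorEq, ite_false, if_neg hb, if_neg hv]
          simp only [hb, hv, false_and, ite_false]
          by_cases hs1 : PySem.Str.startswith arg "--backend=" = true
          · simp only [hs1, ite_true]
            exact ih rest (by simp at hlen; omega) _ _
          · simp only [hs1, ite_false, Bool.false_eq_true]
            by_cases hs2 : PySem.Str.startswith arg "--adapter-vendor-id=" = true
            · simp only [hs2, ite_true]
              exact ih rest (by simp at hlen; omega) _ _
            · simp only [hs2, ite_false, Bool.false_eq_true]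
              exact ih rest (by simp at hlen; omega) _ _

-- ===== VERDICT (by name: the statement is the Claim_ definition above) =====
theorem parse_adapter_requirements_spec : Claim_equal_parse_adapter_requirements := by
  intro extra_args _
  unfold Spec_parse_adapter_requirements parse_adapter_requirements parse_adapter_requirements_alt
  exact (pvLoop_agree_aux extra_args.length extra_args le_rfl none none).symm
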